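-- pv_equiv track=rewrite | github.com/stephen-roy-hill/smuckers | boost/smuckers/views.py | calculate_count_of_unique_drums
-- ===== SOURCE A (Python) =====
-- def calculate_count_of_unique_drums(scan_list):
-- 	itemCode_date_list = [scan[3:15] for scan in scan_list]
-- 	# Calculate the counts for each drum
-- 	itemCode_date_dict = {}
-- 	for drum in itemCode_date_list:
-- 		if drum in itemCode_date_dict:
-- 			itemCode_date_dict[drum]['count'] += 1
-- 		else:
-- 			itemCode_date_dict[drum] = {'count': 1}
-- 	return itemCode_date_dict
-- ===== SOURCE B (Python) =====
-- def calculate_count_of_unique_drums(scan_list):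
-- 	# Dict-free: stage 1 dedupes the drum codes in first-seen order,
-- 	# stage 2 counts each unique code with list.count.
-- 	drums = [scan[3:15] for scan in scan_list]
-- 	seen = []
-- 	for d in drums:
-- 		if d not in seen:
-- 			seen.append(d)
-- 	return {d: {'count': drums.count(d)} for d in seen}
-- ===== Notes on version B (the rewrite author's own statement) =====
-- stated objective: alternative
-- what changed: B drops the counting dictionary entirely: it first dedupes the drum codes into a first-seen-order list, then counts each unique code with a separate list.count pass, instead of A's single loop that builds and mutates nested count dicts in place; this trades A's O(n) hash pass for a dict-free O(n*u) two-stage scan.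
import Mathlib
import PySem

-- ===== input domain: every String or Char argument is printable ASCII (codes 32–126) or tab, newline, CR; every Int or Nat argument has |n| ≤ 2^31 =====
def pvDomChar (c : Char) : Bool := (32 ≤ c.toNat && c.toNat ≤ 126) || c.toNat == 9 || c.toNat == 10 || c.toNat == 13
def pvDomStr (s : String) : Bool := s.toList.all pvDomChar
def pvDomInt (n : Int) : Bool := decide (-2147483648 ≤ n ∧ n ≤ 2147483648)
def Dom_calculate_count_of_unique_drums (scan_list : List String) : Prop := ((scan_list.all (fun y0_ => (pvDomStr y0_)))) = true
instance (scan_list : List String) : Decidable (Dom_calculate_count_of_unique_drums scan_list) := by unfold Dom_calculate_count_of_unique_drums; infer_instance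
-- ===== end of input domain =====

-- B is dict-free: it dedupes the drum codes in first-seen order and then counts each unique
-- code with a separate list.count pass, instead of A's single loop mutating nested count dicts.

-- ===== PORT A =====
def calculate_count_of_unique_drums (scan_list : List String) : List (String × List (String × Int)) :=
  let itemCode_date_list := scan_list.map (fun scan => PySem.Str.slice scan (some 3) (some 15))
  let itemCode_date_dict :=
    itemCode_date_list.foldl
      (fun d drum =>
        if d.contains drum then
          -- itemCode_date_dict[drum]['count'] += 1
          d.modify drum PySem.Dict.empty (fun inner => inner.modify "count" 0 (· + 1))
        else
          d.insert drum (PySem.Dict.ofList [("count", (1 : Int))]))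
      (PySem.Dict.empty : PySem.Dict String (PySem.Dict String Int))
  itemCode_date_dict.items.map (fun p => (p.1, p.2.items))

-- ===== PORT B =====
def calculate_count_of_unique_drums_alt (scan_list : List String) : List (String × List (String × Int)) :=
  let drums := scan_list.map (fun scan => PySem.Str.slice scan (some 3) (some 15))
  let seen := drums.foldl (fun acc d => if acc.contains d then acc else acc ++ [d]) ([] : List String)
  seen.map (fun d => (d, [("count", PySem.List.count drums d)]))

-- ===== PRECONDITION & SPEC =====
def Spec_calculate_count_of_unique_drums (scan_list : List String) (out : List (String × List (String × Int))) : Prop := out = calculate_count_of_unique_drums_alt scan_list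
instance (scan_list : List String) (out : List (String × List (String × Int))) : Decidable (Spec_calculate_count_of_unique_drums scan_list out) := by unfold Spec_calculate_count_of_unique_drums; infer_instance

-- ===== CLAIM (what is proved, stated in full; the proofs are below) =====
def Claim_equal_calculate_count_of_unique_drums : Prop := ∀ (scan_list : List String), Dom_calculate_count_of_unique_drums scan_list → Spec_calculate_count_of_unique_drums scan_list (calculate_count_of_unique_drums scan_list)

-- ===== LEMMAS AND PROOFS =====

-- pvG embeds a tally entry (drum, n) as A's nested entry (drum, {'count': n}).
def pvG (p : String × Int) : String × PySem.Dict String Int := (p.1, ⟨[("count", p.2)]⟩)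

lemma pvContains_emb (its : List (String × Int)) (x : String) :
    (PySem.Dict.mk (its.map pvG)).contains x = (PySem.Dict.mk its).contains x := by
  simp [PySem.Dict.contains, List.any_map, pvG, Function.comp_def]

lemma pvGet?_emb (its : List (String × Int)) (x : String) :
    (PySem.Dict.mk (its.map pvG)).get? x
      = ((PySem.Dict.mk its).get? x).map (fun n => (⟨[("count", n)]⟩ : PySem.Dict String Int)) := by
  simp [PySem.Dict.get?, List.find?_map, pvG, Function.comp_def, Option.map_map]

lemma pvStep_comm (c : PySem.Dict String Int) (x : String) :
    (if (PySem.Dict.mk (c.items.map pvG)).contains x then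
        (PySem.Dict.mk (c.items.map pvG)).modify x PySem.Dict.empty
          (fun inner => inner.modify "count" 0 (· + 1))
      else
        (PySem.Dict.mk (c.items.map pvG)).insert x (PySem.Dict.ofList [("count", (1 : Int))]))
      = PySem.Dict.mk ((c.insert x (c.getD x 0 + 1)).items.map pvG) := by
  have hc : (PySem.Dict.mk c.items) = c := rfl
  by_cases h : c.contains x = true
  · -- drum already present: both sides replace the entry in place
    obtain ⟨n, hn⟩ : ∃ n, c.get? x = some n := by
      rw [PySem.Dict.contains_eq_isSome_get?] at h
      exact Option.isSome_iff_exists.mp h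
    have hemb : (PySem.Dict.mk (c.items.map pvG)).contains x = true := by
      rw [pvContains_emb, hc, h]
    have hgd : c.getD x 0 = n := by simp [PySem.Dict.getD, hn]
    rw [if_pos hemb]
    have hget : (PySem.Dict.mk (c.items.map pvG)).getD x PySem.Dict.empty
        = (⟨[("count", n)]⟩ : PySem.Dict String Int) := by
      simp [PySem.Dict.getD, pvGet?_emb, hc, hn]
    have hinner : (⟨[("count", n)]⟩ : PySem.Dict String Int).modify "count" 0 (· + 1)
        = (⟨[("count", n + 1)]⟩ : PySem.Dict String Int) := by
      simp [PySem.Dict.modify, PySem.Dict.insert, PySem.Dict.contains, PySem.Dict.getD,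
        PySem.Dict.get?]
    rw [PySem.Dict.modify, hget, hinner]
    rw [PySem.Dict.insert, PySem.Dict.insert, if_pos hemb, if_pos h, hgd]
    simp only [List.map_map, PySem.Dict.mk.injEq]
    apply List.map_congr_left
    intro p _
    by_cases hp : p.1 = x <;> simp [hp, pvG]
  · -- fresh drum: both sides append a new entry
    have hemb : (PySem.Dict.mk (c.items.map pvG)).contains x = false := by
      rw [pvContains_emb, hc]
      exact eq_false_of_ne_true h
    have hgd : c.getD x 0 = 0 :=
      PySem.Dict.getD_of_not_contains c 0 (eq_false_of_ne_true h)
    rw [if_neg (by simp [hemb])]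
    rw [PySem.Dict.insert, PySem.Dict.insert, hemb, hgd]
    simp only [if_neg h, Bool.false_eq_true, if_false, List.map_append,
      PySem.Dict.mk.injEq]
    rfl

lemma pvFold_comm (l : List String) (c : PySem.Dict String Int) :
    l.foldl
      (fun d drum =>
        if d.contains drum then
          d.modify drum PySem.Dict.empty (fun inner => inner.modify "count" 0 (· + 1))
        else
          d.insert drum (PySem.Dict.ofList [("count", (1 : Int))]))
      (PySem.Dict.mk (c.items.map pvG))
    = PySem.Dict.mk
        ((l.foldl (fun d drum => d.insert drum (d.getD drum 0 + 1)) c).items.map pvG) := by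
  induction l generalizing c with
  | nil => rfl
  | cons x l ih =>
      simp only [List.foldl_cons]
      rw [pvStep_comm c x]
      exact ih (c.insert x (c.getD x 0 + 1))

-- ===== VERDICT (by name: the statement is the Claim_ definition above) =====
theorem calculate_count_of_unique_drums_spec : Claim_equal_calculate_count_of_unique_drums := by
  intro scan_list _
  unfold Spec_calculate_count_of_unique_drums calculate_count_of_unique_drums calculate_count_of_unique_drums_alt
  dsimp only
  set drums := scan_list.map (fun scan => PySem.Str.slice scan (some 3) (some 15)) with hdrums
  -- A's nested fold is the embedding of the flat tally fold, which is Counter(drums)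
  have h := pvFold_comm (l := drums) (c := PySem.Dict.empty)
  rw [show (PySem.Dict.empty : PySem.Dict String (PySem.Dict String Int))
        = PySem.Dict.mk ((PySem.Dict.empty : PySem.Dict String Int).items.map pvG) from rfl]
  rw [h]
  rw [show drums.foldl (fun d drum => d.insert drum (d.getD drum 0 + 1)) PySem.Dict.empty
        = PySem.Dict.counter drums from PySem.Dict.foldl_insert_getD_add_one_eq_counter drums]
  -- B's dedup fold is PySem.Set.ofList drums
  have hseen : drums.foldl (fun acc d => if acc.contains d then acc else acc ++ [d])
      ([] : List String) = PySem.Set.ofList drums := by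
    rw [PySem.Set.ofList_eq_foldl]
    rfl
  rw [hseen]
  simp [PySem.Dict.items_counter, pvG, List.map_map, Function.comp_def, PySem.List.count_eq]
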